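-- pv_equiv track=rewrite | github.com/n0reflecti0n/Spellcheck | main.py | top_similar
-- ===== SOURCE A (Python) =====
-- def levenstein(str1, str2):
--     N = len(str1) + 1
--     M = len(str2) + 1
--     matrix = [[0] * M for _ in range(N)]
--     for i in range(N):
--         matrix[i][0] = i
--     for j in range(M):
--         matrix[0][j] = j
--     for i in range(1, N):
--         for j in range(1, M):
--             matrix[i][j] = min(matrix[i][j - 1] + 1,
--                                matrix[i - 1][j] + 1,
--                                matrix[i - 1][j - 1] +
--                                (str1[i - 1] != str2[j - 1]))
--     return matrix[N - 1][M - 1]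
--
-- def top_similar(dict, str, top):
--     most_similar = []
--     for i, word in enumerate(dict):
--         distance = levenstein(word, str)
--         if i < top:
--             most_similar.append((word, distance))
--         elif most_similar[-1][1] > distance:
--             most_similar[-1] = (word, distance)
--         most_similar = sorted(most_similar, key=lambda x: x[1])
--     return most_similar
-- ===== SOURCE B (Python) =====
-- def levenstein(str1, str2):
--     prev = list(range(len(str2) + 1))
--     for c in str1:
--         last = prev[0] + 1
--         cur = [last]
--         for d, diag, up in zip(str2, prev, prev[1:]):
--             last = min(last + 1, up + 1, diag + (c != d))
--             cur.append(last)
--         prev = cur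
--     return prev[-1]
--
-- def top_similar(dict, str, top):
--     scored = [(word, levenstein(word, str)) for word in dict]
--     return sorted(scored, key=lambda x: x[1])[:max(top, 0)]
-- ===== Notes on version B (the rewrite author's own statement) =====
-- stated objective: alternative
-- what changed: B computes each edit distance with a rolling two-row DP (iterating over zip(str2, prev, prev[1:]) instead of building and indexing the full (N+1)x(M+1) matrix) and selects the top entries with one scoring pass, a single stable sort and a slice, replacing A's per-word append/replace-last/re-sort bookkeeping.
-- outside the precondition, e.g. on top_similar(['a'], 'b', 0): A raises IndexError, B returns []
-- crash fix: When dict is non-empty and top <= 0, A raises IndexError (most_similar[-1] on an empty list); B returns []. — e.g. on top_similar(["a"], "b", 0): A raises IndexError, B returns []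
import Mathlib
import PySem

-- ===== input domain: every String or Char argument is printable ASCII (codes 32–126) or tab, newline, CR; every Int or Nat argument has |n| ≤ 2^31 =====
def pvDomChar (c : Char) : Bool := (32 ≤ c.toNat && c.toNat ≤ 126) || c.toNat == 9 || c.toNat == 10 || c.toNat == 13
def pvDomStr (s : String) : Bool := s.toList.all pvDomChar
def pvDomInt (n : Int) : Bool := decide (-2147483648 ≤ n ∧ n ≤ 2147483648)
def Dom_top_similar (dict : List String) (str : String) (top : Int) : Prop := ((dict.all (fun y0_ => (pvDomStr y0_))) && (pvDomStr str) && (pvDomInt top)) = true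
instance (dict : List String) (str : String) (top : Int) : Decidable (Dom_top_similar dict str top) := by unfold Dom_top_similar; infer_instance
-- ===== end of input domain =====

-- B computes each edit distance with a rolling two-row DP instead of A's full matrix,
-- and picks the top entries with one scoring pass + one stable sort + slice instead of
-- A's per-word append/replace-last/re-sort bookkeeping (alternative; same return value
-- wherever A returns).

-- ===== PORT A =====
-- A's `levenstein`: full (N)x(M) matrix with in-place updates.
-- matrix[i][j] reads/writes are ported with getD/set: every index the loops produce
-- is a nonnegative in-range index, where getD/set are exact.
def pvMget (m : List (List Int)) (i j : Nat) : Int := (m.getD i []).getD j 0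
def pvMset (m : List (List Int)) (i j : Nat) (v : Int) : List (List Int) :=
  m.set i ((m.getD i []).set j v)

def levenstein (str1 str2 : String) : Int :=
  let s1 := str1.toList
  let s2 := str2.toList
  let N := s1.length + 1
  let M := s2.length + 1
  let matrix : List (List Int) := (List.range N).map (fun _ => List.replicate M (0 : Int))
  let matrix := (List.range N).foldl (fun m i => pvMset m i 0 (i : Int)) matrix
  let matrix := (List.range M).foldl (fun m j => pvMset m 0 j (j : Int)) matrix
  let matrix := (List.range' 1 (N - 1)).foldl (fun m i =>
    (List.range' 1 (M - 1)).foldl (fun m j =>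
      -- str1[i-1] / str2[j-1]: i-1 < len s1, j-1 < len s2, in range, so getD is exact
      pvMset m i j (min (pvMget m i (j - 1) + 1)
        (min (pvMget m (i - 1) j + 1)
          (pvMget m (i - 1) (j - 1) +
            (if s1.getD (i - 1) ' ' ≠ s2.getD (j - 1) ' ' then 1 else 0))))) m) matrix
  pvMget matrix (N - 1) (M - 1)

-- `most_similar[-1] = (word, distance)` on a nonempty list is dropLast ++ [new]
def top_similar (dict : List String) (str : String) (top : Int) : List (String × Int) :=
  (PySem.List.enumerate dict).foldl (fun most_similar iw =>
    let distance := levenstein iw.2 str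
    let ms :=
      if iw.1 < top then most_similar ++ [(iw.2, distance)]
      else
        match PySem.List.pyGet? most_similar (-1) with
        | none => []  -- Python raises IndexError here; excluded by Pre_top_similar
        | some last =>
          if last.2 > distance then most_similar.dropLast ++ [(iw.2, distance)]
          else most_similar
    PySem.List.sorted ms (fun x => x.2)) []

-- ===== PORT B =====
-- B's `levenstein`: rolling two-row DP. prev[0] is in range (prev always nonempty,
-- length len(str2)+1); prev[1:] is drop 1; prev[-1] on the final nonempty row is getLastD.
def levenstein_alt (str1 str2 : String) : Int :=
  let s2 := str2.toList
  let prev0 : List Int := (List.range (s2.length + 1)).map (fun (j : Nat) => (j : Int))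
  let prev := str1.toList.foldl (fun prev c =>
    let last0 := prev.getD 0 0 + 1
    let r := (s2.zip (prev.zip (prev.drop 1))).foldl
      (fun (st : List Int × Int) x =>
        let last := min (st.2 + 1) (min (x.2.2 + 1) (x.2.1 + (if c ≠ x.1 then (1 : Int) else 0)))
        (st.1 ++ [last], last)) ([last0], last0)
    r.1) prev0
  prev.getLastD 0

def top_similar_alt (dict : List String) (str : String) (top : Int) : List (String × Int) :=
  let scored := dict.map (fun word => (word, levenstein_alt word str))
  PySem.List.slice (PySem.List.sorted scored (fun x => x.2)) none (some (max top 0))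

-- ===== PRECONDITION & SPEC =====
-- Pre_ excludes exactly the inputs where A raises IndexError (non-empty dict with top <= 0:
-- most_similar[-1] on an empty list); A returns normally everywhere else.
def Pre_top_similar (dict : List String) (str : String) (top : Int) : Prop :=
  dict = [] ∨ 1 ≤ top
instance (dict : List String) (str : String) (top : Int) : Decidable (Pre_top_similar dict str top) := by unfold Pre_top_similar; infer_instance

def pvWitness_top_similar : List String × String × Int := (["cat", "hat", "dog"], "bat", 2)

-- When dict is non-empty and top <= 0, A raises IndexError; B returns [].
def Raises_top_similar (dict : List String) (str : String) (top : Int) : Prop :=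
  dict ≠ [] ∧ top ≤ 0
instance (dict : List String) (str : String) (top : Int) : Decidable (Raises_top_similar dict str top) := by unfold Raises_top_similar; infer_instance
def pvRaiseWitness_top_similar : List String × String × Int := (["a"], "b", 0)
def pvRaiseWitnessOut_top_similar : List (String × Int) := []

def Spec_top_similar (dict : List String) (str : String) (top : Int) (out : List (String × Int)) : Prop := out = top_similar_alt dict str top
instance (dict : List String) (str : String) (top : Int) (out : List (String × Int)) : Decidable (Spec_top_similar dict str top out) := by unfold Spec_top_similar; infer_instance

-- ===== CLAIM (what is proved, stated in full; the proofs are below) =====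
def Claim_equal_top_similar : Prop := ∀ (dict : List String) (str : String) (top : Int), Dom_top_similar dict str top → Pre_top_similar dict str top → Spec_top_similar dict str top (top_similar dict str top)
def Claim_raises_top_similar : Prop := (∀ (dict : List String) (str : String) (top : Int), Dom_top_similar dict str top → Raises_top_similar dict str top → ¬ Pre_top_similar dict str top) ∧ (Dom_top_similar (pvRaiseWitness_top_similar.1) (pvRaiseWitness_top_similar.2.1) (pvRaiseWitness_top_similar.2.2) ∧ Raises_top_similar (pvRaiseWitness_top_similar.1) (pvRaiseWitness_top_similar.2.1) (pvRaiseWitness_top_similar.2.2) ∧ top_similar_alt (pvRaiseWitness_top_similar.1) (pvRaiseWitness_top_similar.2.1) (pvRaiseWitness_top_similar.2.2) = pvRaiseWitnessOut_top_similar)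

-- ===== LEMMAS AND PROOFS =====

-- the mathematical edit-distance table both levenstein ports are proved to compute
def Dspec (s1 s2 : List Char) : Nat → Nat → Int
  | 0, j => (j : Int)
  | (i+1), 0 => ((i : Int) + 1)
  | (i+1), (j+1) =>
      min (Dspec s1 s2 (i+1) j + 1)
        (min (Dspec s1 s2 i (j+1) + 1)
          (Dspec s1 s2 i j + (if s1.getD i ' ' ≠ s2.getD j ' ' then 1 else 0)))
termination_by i j => (i, j)

-- ---- pvMget/pvMset basics ----
theorem pvMset_length (m : List (List Int)) (i j : Nat) (v : Int) :
    (pvMset m i j v).length = m.length := by simp [pvMset]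

theorem pvMset_row_length (m : List (List Int)) (i j : Nat) (v : Int) (r : Nat) :
    ((pvMset m i j v).getD r []).length = (m.getD r []).length := by
  by_cases h : r = i
  · subst h
    by_cases hi : r < m.length
    · simp [pvMset, List.getD, List.getElem?_set_self, hi, List.getElem?_eq_getElem hi]
    · simp [pvMset, List.getD, List.getElem?_eq_none_iff.mpr (by omega : m.length ≤ r),
        List.set_eq_of_length_le (by omega : m.length ≤ r)]
  · simp [pvMset, List.getD, List.getElem?_set_ne (fun hh => h hh.symm)]

theorem pvMget_pvMset_self (m : List (List Int)) (i j : Nat) (v : Int)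
    (hi : i < m.length) (hj : j < (m.getD i []).length) :
    pvMget (pvMset m i j v) i j = v := by
  have hj' : j < m[i].length := by simpa [List.getD, List.getElem?_eq_getElem hi] using hj
  simp [pvMget, pvMset, List.getD, hi]
  rw [List.getElem?_set_self (by simpa using hj')]
  rfl

theorem pvMget_pvMset_ne (m : List (List Int)) (i j i' j' : Nat) (v : Int)
    (h : i' ≠ i ∨ j' ≠ j) :
    pvMget (pvMset m i j v) i' j' = pvMget m i' j' := by
  by_cases hii : i' = i
  · subst hii
    rcases h with h | h
    · exact absurd rfl h
    · by_cases hi : i' < m.length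
      · simp [pvMget, pvMset, List.getD, hi, List.getElem?_eq_getElem hi]
        rw [List.getElem?_set_ne (Ne.symm h)]
      · simp [pvMget, pvMset, List.set_eq_of_length_le (by omega : m.length ≤ i')]
  · simp [pvMget, pvMset, List.getD, List.getElem?_set_ne (fun hh => hii hh.symm)]

-- ---- A side: the matrix after the loops is Dspec ----
-- the inner loop of A's levenstein, writing row i+1 (proof-side name)
def innerF (s1 s2 : List Char) (i : Nat) (mat : List (List Int)) (k : Nat) : List (List Int) :=
  (List.range' 1 k).foldl (fun m j =>
    pvMset m (i+1) j (min (pvMget m (i+1) (j - 1) + 1)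
      (min (pvMget m i j + 1)
        (pvMget m i (j - 1) +
          (if s1.getD i ' ' ≠ s2.getD (j - 1) ' ' then 1 else 0))))) mat

theorem A_inner (s1 s2 : List Char) (i : Nat) (mat : List (List Int))
    (hlen : mat.length = s1.length + 1) (hi : i < s1.length)
    (hrow : ∀ r, r < mat.length → (mat.getD r []).length = s2.length + 1)
    (hprev : ∀ j, j ≤ s2.length → pvMget mat i j = Dspec s1 s2 i j)
    (hcol : pvMget mat (i+1) 0 = ((i : Int) + 1)) :
    ∀ k, k ≤ s2.length →
      (innerF s1 s2 i mat k).length = mat.length ∧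
      (∀ r, ((innerF s1 s2 i mat k).getD r []).length = (mat.getD r []).length) ∧
      (∀ r j', r ≠ i + 1 → pvMget (innerF s1 s2 i mat k) r j' = pvMget mat r j') ∧
      (∀ j, j ≤ k → pvMget (innerF s1 s2 i mat k) (i+1) j = Dspec s1 s2 (i+1) j) := by
  intro k
  induction k with
  | zero =>
    intro _
    refine ⟨rfl, fun r => rfl, fun r j' _ => rfl, ?_⟩
    intro j hj
    have hj0 : j = 0 := by omega
    subst hj0
    show pvMget mat (i+1) 0 = Dspec s1 s2 (i+1) 0
    rw [hcol, Dspec]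
  | succ k ih =>
    intro hk
    obtain ⟨ih1, ih2, ih3, ih4⟩ := ih (by omega)
    have hstep : innerF s1 s2 i mat (k+1) =
        pvMset (innerF s1 s2 i mat k) (i+1) (1+k)
          (min (pvMget (innerF s1 s2 i mat k) (i+1) ((1+k) - 1) + 1)
            (min (pvMget (innerF s1 s2 i mat k) i (1+k) + 1)
              (pvMget (innerF s1 s2 i mat k) i ((1+k) - 1) +
                (if s1.getD i ' ' ≠ s2.getD ((1+k) - 1) ' ' then 1 else 0)))) := by
      unfold innerF
      rw [List.range'_concat, List.foldl_append]
      simp only [Nat.one_mul]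
      rfl
    have hk1 : (1+k) - 1 = k := by omega
    have hi1 : i + 1 < mat.length := by omega
    have hrlen : ((innerF s1 s2 i mat k).getD (i+1) []).length = s2.length + 1 := by
      rw [ih2]; exact hrow (i+1) hi1
    have hval : (min (pvMget (innerF s1 s2 i mat k) (i+1) ((1+k) - 1) + 1)
        (min (pvMget (innerF s1 s2 i mat k) i (1+k) + 1)
          (pvMget (innerF s1 s2 i mat k) i ((1+k) - 1) +
            (if s1.getD i ' ' ≠ s2.getD ((1+k) - 1) ' ' then 1 else 0))))
        = Dspec s1 s2 (i+1) (k+1) := by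
      rw [hk1, ih4 k (le_refl k), ih3 i (1+k) (by omega), ih3 i k (by omega),
        hprev (1+k) (by omega), hprev k (by omega), Dspec]
      norm_num [Nat.add_comm 1 k]
    refine ⟨?_, ?_, ?_, ?_⟩
    · rw [hstep, pvMset_length, ih1]
    · intro r; rw [hstep, pvMset_row_length, ih2]
    · intro r j' hr
      rw [hstep, pvMget_pvMset_ne _ _ _ _ _ _ (Or.inl hr), ih3 r j' hr]
    · intro j hj
      rcases Nat.lt_or_ge j (k+1) with h | h
      · rw [hstep, pvMget_pvMset_ne _ _ _ _ _ _ (Or.inr (by omega)), ih4 j (by omega)]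
      · have hj1 : j = k + 1 := by omega
        subst hj1
        rw [hstep]
        rw [show k + 1 = 1 + k from by omega] at hval ⊢
        rw [pvMget_pvMset_self _ _ _ _ (by omega) (by rw [hrlen]; omega), hval]

-- the initial matrix of A's levenstein after both initialisation loops (proof-side name)
def matInit (s1 s2 : List Char) : List (List Int) :=
  (List.range (s2.length + 1)).foldl (fun m j => pvMset m 0 j (j : Int))
    ((List.range (s1.length + 1)).foldl (fun m i => pvMset m i 0 (i : Int))
      ((List.range (s1.length + 1)).map (fun _ => List.replicate (s2.length + 1) (0 : Int))))

theorem length_foldl_pvMset (l : List Nat) (F G : Nat → Nat) (V : Nat → Int) :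
    ∀ (m0 : List (List Int)),
      (l.foldl (fun m a => pvMset m (F a) (G a) (V a)) m0).length = m0.length := by
  induction l with
  | nil => intro m0; rfl
  | cons a l ih => intro m0; rw [List.foldl_cons, ih, pvMset_length]

theorem row_foldl_pvMset (l : List Nat) (F G : Nat → Nat) (V : Nat → Int) :
    ∀ (m0 : List (List Int)) (r : Nat),
      ((l.foldl (fun m a => pvMset m (F a) (G a) (V a)) m0).getD r []).length
        = ((m0.getD r []).length) := by
  induction l with
  | nil => intro m0 r; rfl
  | cons a l ih => intro m0 r; rw [List.foldl_cons, ih, pvMset_row_length]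

theorem matInit_length (s1 s2 : List Char) : (matInit s1 s2).length = s1.length + 1 := by
  unfold matInit
  rw [length_foldl_pvMset, length_foldl_pvMset]
  simp

theorem matInit_row (s1 s2 : List Char) (r : Nat) (hr : r < s1.length + 1) :
    ((matInit s1 s2).getD r []).length = s2.length + 1 := by
  unfold matInit
  rw [row_foldl_pvMset, row_foldl_pvMset]
  simp [List.getD, List.getElem?_replicate, hr]

theorem matrix0_get (s1 s2 : List Char) (r j : Nat) :
    pvMget ((List.range (s1.length+1)).map (fun _ => List.replicate (s2.length+1) (0 : Int))) r j = 0 := by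
  unfold pvMget
  simp only [List.getD, List.map_const', List.length_range, List.getElem?_replicate]
  split
  · simp only [Option.getD_some, List.getElem?_replicate]
    split <;> rfl
  · simp only [Option.getD_none]
    simp

-- after the first init fold, entry (r,0) is r (r < N) and everything else is 0
theorem fold1_get (s1 s2 : List Char) :
    ∀ (K : Nat), K ≤ s1.length + 1 →
      ∀ (r j : Nat),
        pvMget ((List.range K).foldl (fun m i => pvMset m i 0 (i : Int))
            ((List.range (s1.length+1)).map (fun _ => List.replicate (s2.length+1) (0 : Int)))) r j
          = if r < K ∧ j = 0 then (r : Int) else 0 := by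
  intro K
  induction K with
  | zero =>
    intro _ r j
    simp only [List.range_zero, List.foldl_nil]
    rw [matrix0_get]
    simp
  | succ K ih =>
    intro hK r j
    rw [show List.range (K+1) = List.range K ++ [K] from List.range_succ,
      List.foldl_append, List.foldl_cons, List.foldl_nil]
    by_cases h : r = K ∧ j = 0
    · obtain ⟨h1, h2⟩ := h
      subst h1; subst h2
      rw [pvMget_pvMset_self]
      · rw [if_pos ⟨Nat.lt_succ_self r, rfl⟩]
      · rw [length_foldl_pvMset]; simp; omega
      · rw [row_foldl_pvMset]
        simp only [List.getD, List.map_const', List.length_range, List.getElem?_replicate]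
        rw [if_pos (by omega : r < s1.length + 1)]
        simp
    · have hne : r ≠ K ∨ j ≠ 0 := by tauto
      rw [pvMget_pvMset_ne _ _ _ _ _ _ hne, ih (by omega)]
      by_cases hrK : r < K ∧ j = 0
      · rw [if_pos hrK, if_pos ⟨by omega, hrK.2⟩]
      · have hx : ¬ (r < K + 1 ∧ j = 0) := by
          rintro ⟨a, b⟩
          rcases hne with hne | hne
          · exact hrK ⟨by omega, b⟩
          · exact hne b
        rw [if_neg hrK, if_neg hx]

theorem matInit_get (s1 s2 : List Char) :
    ∀ (K : Nat), K ≤ s2.length + 1 →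
      ∀ (r j : Nat),
        pvMget ((List.range K).foldl (fun m j => pvMset m 0 j (j : Int))
            ((List.range (s1.length+1)).foldl (fun m i => pvMset m i 0 (i : Int))
              ((List.range (s1.length+1)).map (fun _ => List.replicate (s2.length+1) (0 : Int))))) r j
          = if r = 0 ∧ j < K then (j : Int)
            else if r < s1.length + 1 ∧ j = 0 then (r : Int) else 0 := by
  intro K
  induction K with
  | zero =>
    intro _ r j
    simp only [List.range_zero, List.foldl_nil]
    rw [fold1_get s1 s2 (s1.length+1) (le_refl _)]
    simp
  | succ K ih =>
    intro hK r j
    rw [show List.range (K+1) = List.range K ++ [K] from List.range_succ,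
      List.foldl_append, List.foldl_cons, List.foldl_nil]
    by_cases h : r = 0 ∧ j = K
    · obtain ⟨h1, h2⟩ := h
      subst h1; subst h2
      rw [pvMget_pvMset_self]
      · rw [if_pos ⟨rfl, Nat.lt_succ_self j⟩]
      · rw [length_foldl_pvMset, length_foldl_pvMset]; simp
      · rw [row_foldl_pvMset, row_foldl_pvMset]
        simp only [List.getD, List.map_const', List.length_range, List.getElem?_replicate]
        rw [if_pos (by omega : (0:Nat) < s1.length + 1)]
        simp
        omega
    · have hne : r ≠ 0 ∨ j ≠ K := by tauto
      rw [pvMget_pvMset_ne _ _ _ _ _ _ hne, ih (by omega)]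
      by_cases h1 : r = 0 ∧ j < K
      · rw [if_pos h1, if_pos ⟨h1.1, by omega⟩]
      · have h2 : ¬ (r = 0 ∧ j < K + 1) := by
          rintro ⟨a, b⟩
          rcases hne with hne | hne
          · exact hne a
          · exact h1 ⟨a, by omega⟩
        rw [if_neg h1, if_neg h2]

-- the outer loop: rows 0..k of the fold are Dspec, rows above k untouched
theorem A_outer (s1 s2 : List Char) :
    ∀ (k : Nat), k ≤ s1.length →
      (let matK := (List.range' 1 k).foldl (fun m i => innerF s1 s2 (i - 1) m s2.length) (matInit s1 s2)
      matK.length = s1.length + 1 ∧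
      (∀ r, (matK.getD r []).length = ((matInit s1 s2).getD r []).length) ∧
      (∀ r j', r > k → pvMget matK r j' = pvMget (matInit s1 s2) r j') ∧
      (∀ i, i ≤ k → ∀ j, j ≤ s2.length → pvMget matK i j = Dspec s1 s2 i j)) := by
  intro k
  induction k with
  | zero =>
    intro _
    refine ⟨matInit_length s1 s2, fun r => rfl, fun r j' _ => rfl, ?_⟩
    intro i hi j hj
    have : i = 0 := by omega
    subst this
    show pvMget (matInit s1 s2) 0 j = Dspec s1 s2 0 j
    unfold matInit
    rw [matInit_get s1 s2 (s2.length+1) (le_refl _)]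
    simp [show j < s2.length + 1 from by omega, Dspec]
  | succ k ih =>
    intro hk
    obtain ⟨ih1, ih2, ih3, ih4⟩ := ih (by omega)
    set matK := (List.range' 1 k).foldl (fun m i => innerF s1 s2 (i - 1) m s2.length) (matInit s1 s2) with hmatK
    have hstep : (List.range' 1 (k+1)).foldl (fun m i => innerF s1 s2 (i - 1) m s2.length) (matInit s1 s2)
        = innerF s1 s2 ((1+k) - 1) matK s2.length := by
      rw [List.range'_concat, List.foldl_append]
      simp only [Nat.one_mul]
      rfl
    have hk1 : (1+k) - 1 = k := by omega
    rw [hk1] at hstep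
    have hrowK : ∀ r, r < matK.length → (matK.getD r []).length = s2.length + 1 := by
      intro r hr
      rw [ih2 r]
      exact matInit_row s1 s2 r (by omega)
    have hprevK : ∀ j, j ≤ s2.length → pvMget matK k j = Dspec s1 s2 k j :=
      fun j hj => ih4 k (le_refl k) j hj
    have hcolK : pvMget matK (k+1) 0 = ((k : Int) + 1) := by
      rw [ih3 (k+1) 0 (by omega)]
      unfold matInit
      rw [matInit_get s1 s2 (s2.length+1) (le_refl _)]
      simp [show k + 1 < s1.length + 1 from by omega]
    obtain ⟨a1, a2, a3, a4⟩ := A_inner s1 s2 k matK ih1 (by omega) hrowK hprevK hcolK s2.length (le_refl _)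
    refine ⟨?_, ?_, ?_, ?_⟩
    · rw [hstep, a1, ih1]
    · intro r; rw [hstep, a2, ih2]
    · intro r j' hr
      rw [hstep, a3 r j' (by omega), ih3 r j' (by omega)]
    · intro i hi j hj
      rcases Nat.lt_or_ge i (k+1) with h | h
      · rw [hstep, a3 i j (by omega), ih4 i (by omega) j hj]
      · have : i = k + 1 := by omega
        subst this
        rw [hstep, a4 j hj]

theorem A_levenstein (str1 str2 : String) :
    levenstein str1 str2 = Dspec str1.toList str2.toList str1.toList.length str2.toList.length := by
  set s1 := str1.toList
  set s2 := str2.toList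
  show pvMget ((List.range' 1 (s1.length + 1 - 1)).foldl (fun m i =>
      (List.range' 1 (s2.length + 1 - 1)).foldl (fun m j =>
        pvMset m i j (min (pvMget m i (j - 1) + 1)
          (min (pvMget m (i - 1) j + 1)
            (pvMget m (i - 1) (j - 1) +
              (if s1.getD (i - 1) ' ' ≠ s2.getD (j - 1) ' ' then 1 else 0))))) m)
      (matInit s1 s2)) (s1.length + 1 - 1) (s2.length + 1 - 1) = _
  have hN : s1.length + 1 - 1 = s1.length := by omega
  have hM : s2.length + 1 - 1 = s2.length := by omega
  rw [hN, hM]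
  have hbody : (List.range' 1 s1.length).foldl (fun m i =>
      (List.range' 1 s2.length).foldl (fun m j =>
        pvMset m i j (min (pvMget m i (j - 1) + 1)
          (min (pvMget m (i - 1) j + 1)
            (pvMget m (i - 1) (j - 1) +
              (if s1.getD (i - 1) ' ' ≠ s2.getD (j - 1) ' ' then 1 else 0))))) m)
      (matInit s1 s2)
      = (List.range' 1 s1.length).foldl (fun m i => innerF s1 s2 (i - 1) m s2.length) (matInit s1 s2) := by
    apply PySem.List.foldl_congr_mem
    intro m i hi
    have h1 : 1 ≤ i := by
      have := List.mem_range'.mp hi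
      omega
    unfold innerF
    congr 1
    funext m j
    rw [show i - 1 + 1 = i from by omega]
  rw [hbody]
  exact (A_outer s1 s2 s1.length (le_refl _)).2.2.2 s1.length (le_refl _) s2.length (le_refl _)

-- ---- B side: the rolling row is Dspec ----
def rowMap (s1 s2 : List Char) (i : Nat) : List Int :=
  (List.range (s2.length + 1)).map (fun j => Dspec s1 s2 i j)

theorem Dspec_zero (s1 s2 : List Char) (i : Nat) : Dspec s1 s2 i 0 = (i : Int) := by
  cases i with
  | zero => rw [Dspec]
  | succ i => rw [Dspec]; simp

theorem rowMap_getElem? (s1 s2 : List Char) (i j : Nat) (hj : j < s2.length + 1) :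
    (rowMap s1 s2 i)[j]? = some (Dspec s1 s2 i j) := by
  simp [rowMap, List.getElem?_map, List.getElem?_range hj]

-- the inner zip fold of B's levenstein computes row i+1 left to right
theorem B_inner (s1 s2 : List Char) (i : Nat) (c : Char) (hc : c = s1.getD i ' ') :
    ∀ (k j0 : Nat), j0 + k = s2.length → ∀ (acc : List Int),
      (((s2.drop j0).zip
          (((List.range' j0 (k+1)).map (fun j => Dspec s1 s2 i j)).zip
            ((List.range' (j0+1) k).map (fun j => Dspec s1 s2 i j)))).foldl
          (fun (st : List Int × Int) x =>
            (st.1 ++ [min (st.2 + 1) (min (x.2.2 + 1) (x.2.1 + (if c ≠ x.1 then (1:Int) else 0)))],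
             min (st.2 + 1) (min (x.2.2 + 1) (x.2.1 + (if c ≠ x.1 then (1:Int) else 0)))))
          (acc, Dspec s1 s2 (i+1) j0)).1
        = acc ++ (List.range' (j0+1) k).map (fun j => Dspec s1 s2 (i+1) j) := by
  intro k
  induction k with
  | zero =>
    intro j0 hj0 acc
    rw [show j0 = s2.length from by omega, List.drop_length]
    simp
  | succ k ih =>
    intro j0 hj0 acc
    have hj0m : j0 < s2.length := by omega
    have h1 : s2.drop j0 = s2[j0] :: s2.drop (j0+1) := List.drop_eq_getElem_cons hj0m
    have hz : (s2[j0] :: s2.drop (j0+1)).zip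
        (((List.range' j0 (k+1+1)).map (fun j => Dspec s1 s2 i j)).zip
          ((List.range' (j0+1) (k+1)).map (fun j => Dspec s1 s2 i j)))
        = (s2[j0], (Dspec s1 s2 i j0, Dspec s1 s2 i (j0+1))) ::
          ((s2.drop (j0+1)).zip
            (((List.range' (j0+1) (k+1)).map (fun j => Dspec s1 s2 i j)).zip
              ((List.range' (j0+2) k).map (fun j => Dspec s1 s2 i j)))) := rfl
    rw [h1, hz]
    simp only [List.foldl_cons]
    have hval : min (Dspec s1 s2 (i+1) j0 + 1)
        (min (Dspec s1 s2 i (j0+1) + 1)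
          (Dspec s1 s2 i j0 + (if c ≠ s2[j0] then (1:Int) else 0)))
        = Dspec s1 s2 (i+1) (j0+1) := by
      rw [Dspec, hc]
      have : s2.getD j0 ' ' = s2[j0] := by
        rw [List.getD, List.getElem?_eq_getElem hj0m]; rfl
      rw [this]
    rw [hval]
    have hrec := ih (j0+1) (by omega) (acc ++ [Dspec s1 s2 (i+1) (j0+1)])
    rw [show j0+1+1 = j0+2 from rfl] at hrec
    rw [hrec, List.append_assoc]
    rfl

-- one outer step of B's levenstein: row i becomes row i+1
theorem B_step (s1 s2 : List Char) (i : Nat) (hi : i < s1.length) :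
    ((s2.zip ((rowMap s1 s2 i).zip ((rowMap s1 s2 i).drop 1))).foldl
        (fun (st : List Int × Int) x =>
          (st.1 ++ [min (st.2 + 1) (min (x.2.2 + 1) (x.2.1 + (if (s1[i]'hi) ≠ x.1 then (1:Int) else 0)))],
           min (st.2 + 1) (min (x.2.2 + 1) (x.2.1 + (if (s1[i]'hi) ≠ x.1 then (1:Int) else 0)))))
        ([(rowMap s1 s2 i).getD 0 0 + 1], (rowMap s1 s2 i).getD 0 0 + 1)).1
      = rowMap s1 s2 (i+1) := by
  have hget0 : (rowMap s1 s2 i).getD 0 0 = (i : Int) := by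
    rw [List.getD, rowMap_getElem? s1 s2 i 0 (by omega), Option.getD_some, Dspec_zero]
  have hc : (s1[i]'hi) = s1.getD i ' ' := by
    rw [List.getD, List.getElem?_eq_getElem hi]; rfl
  have hrow1 : rowMap s1 s2 i = (List.range' 0 (s2.length+1)).map (fun j => Dspec s1 s2 i j) := by
    rw [rowMap, List.range_eq_range']
  have hrow2 : (rowMap s1 s2 i).drop 1 = (List.range' 1 s2.length).map (fun j => Dspec s1 s2 i j) := by
    rw [hrow1, ← List.map_drop, List.drop_range']
    norm_num
  have h0 : ((i : Int) + 1) = Dspec s1 s2 (i+1) 0 := by rw [Dspec_zero]; push_cast; ring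
  rw [hget0]
  conv_lhs => rw [hrow2, hrow1, h0]
  have := B_inner s1 s2 i (s1[i]'hi) hc s2.length 0 (by omega) [Dspec s1 s2 (i+1) 0]
  rw [List.drop_zero] at this
  rw [show (0+1 : Nat) = 1 from rfl] at this
  rw [this]
  rw [rowMap, List.range_eq_range',
    show List.range' 0 (s2.length+1) = 0 :: List.range' 1 s2.length from rfl, List.map_cons]
  rfl

-- the outer fold of B's levenstein over the remaining characters
theorem B_outer (s1 s2 : List Char) :
    ∀ (k i0 : Nat), i0 + k = s1.length →
      ((s1.drop i0).foldl
        (fun (prev : List Int) (c : Char) =>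
          ((s2.zip (prev.zip (prev.drop 1))).foldl
              (fun (st : List Int × Int) x =>
                (st.1 ++ [min (st.2 + 1) (min (x.2.2 + 1) (x.2.1 + (if c ≠ x.1 then (1:Int) else 0)))],
                 min (st.2 + 1) (min (x.2.2 + 1) (x.2.1 + (if c ≠ x.1 then (1:Int) else 0)))))
              ([prev.getD 0 0 + 1], prev.getD 0 0 + 1)).1)
        (rowMap s1 s2 i0)) = rowMap s1 s2 s1.length := by
  intro k
  induction k with
  | zero =>
    intro i0 hi0
    rw [show i0 = s1.length from by omega, List.drop_length, List.foldl_nil]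
  | succ k ih =>
    intro i0 hi0
    have hi : i0 < s1.length := by omega
    rw [List.drop_eq_getElem_cons hi]
    simp only [List.foldl_cons]
    rw [B_step s1 s2 i0 hi]
    exact ih (i0+1) (by omega)

theorem B_levenstein (str1 str2 : String) :
    levenstein_alt str1 str2 = Dspec str1.toList str2.toList str1.toList.length str2.toList.length := by
  set s1 := str1.toList
  set s2 := str2.toList
  show (s1.foldl
      (fun (prev : List Int) (c : Char) =>
        ((s2.zip (prev.zip (prev.drop 1))).foldl
            (fun (st : List Int × Int) x =>
              (st.1 ++ [min (st.2 + 1) (min (x.2.2 + 1) (x.2.1 + (if c ≠ x.1 then (1:Int) else 0)))],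
               min (st.2 + 1) (min (x.2.2 + 1) (x.2.1 + (if c ≠ x.1 then (1:Int) else 0)))))
            ([prev.getD 0 0 + 1], prev.getD 0 0 + 1)).1)
      (List.map (fun (j : Nat) => (j : Int)) (List.range (s2.length + 1)))).getLastD 0 = _
  have h0 : (List.map (fun (j : Nat) => (j : Int)) (List.range (s2.length + 1))) = rowMap s1 s2 0 := by
    unfold rowMap
    apply List.map_congr_left
    intro j _
    rw [Dspec]
  rw [h0]
  have hout := B_outer s1 s2 s1.length 0 (by omega)
  rw [List.drop_zero] at hout
  rw [hout]
  have hlast : (rowMap s1 s2 s1.length).getLastD 0 = Dspec s1 s2 s1.length s2.length := by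
    rw [List.getLastD_eq_getLast?, List.getLast?_eq_getElem?]
    have hlen : (rowMap s1 s2 s1.length).length = s2.length + 1 := by simp [rowMap]
    rw [hlen, Nat.add_sub_cancel, rowMap_getElem? s1 s2 s1.length s2.length (by omega)]
    rfl
  rw [hlast]

theorem levenstein_eq (str1 str2 : String) : levenstein str1 str2 = levenstein_alt str1 str2 := by
  rw [A_levenstein, B_levenstein]

-- ---- the top_similar loop ----
theorem length_insertBy {α : Type} (before : α → α → Bool) (x : α) (l : List α) :
    (PySem.List.insertBy before x l).length = l.length + 1 := by
  induction l with
  | nil => simp [PySem.List.insertBy]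
  | cons y ys ih =>
    simp only [PySem.List.insertBy]
    split <;> simp [ih]

-- inserting one element into a stable sort: sorted (p ++ [x]) = insertBy x (sorted p)
theorem sorted_append_singleton {α κ : Type} [LinearOrder κ] (p : List α) (x : α) (key : α → κ) :
    PySem.List.sorted (p ++ [x]) key =
      PySem.List.insertBy (fun a b => decide (key a < key b)) x (PySem.List.sorted p key) := by
  rw [PySem.List.sorted_eq_foldl_insertBy, PySem.List.sorted_eq_foldl_insertBy, List.foldl_append]
  rfl

-- if x is inserted no later than position n, taking n+1 commutes with the insertion
theorem take_insertBy_of_before {α : Type} (before : α → α → Bool) (x : α) :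
    ∀ (l : List α) (n : Nat) (hn : n < l.length), before x l[n] = true →
      (PySem.List.insertBy before x l).take (n + 1) = PySem.List.insertBy before x (l.take n) := by
  intro l
  induction l with
  | nil => intro n hn; simp at hn
  | cons y ys ih =>
    intro n hn hb
    by_cases hy : before x y = true
    · cases n with
      | zero => simp [PySem.List.insertBy, hy]
      | succ m => simp [PySem.List.insertBy, hy]
    · cases n with
      | zero => simp at hb; exact absurd hb hy
      | succ m =>
        simp only [PySem.List.insertBy, if_neg hy, List.take_succ_cons]
        rw [ih m (by simpa using hn) (by simpa using hb)]

-- if none of the first n elements trigger the insertion, taking n ignores it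
theorem take_insertBy_of_not_before {α : Type} (before : α → α → Bool) (x : α) :
    ∀ (l : List α) (n : Nat) (hn : n ≤ l.length), (∀ i : Nat, (hi : i < n) → before x (l[i]'(by omega)) = false) →
      (PySem.List.insertBy before x l).take n = l.take n := by
  intro l
  induction l with
  | nil =>
    intro n hn _
    have : n = 0 := by simpa using hn
    subst this; simp
  | cons y ys ih =>
    intro n hn h
    cases n with
    | zero => simp
    | succ m =>
      have hy : before x y = false := h 0 (by omega)
      simp only [PySem.List.insertBy, hy, Bool.false_eq_true, if_false, List.take_succ_cons]
      rw [ih m (by simpa using hn) (fun i hi => by simpa using h (i + 1) (by omega))]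

theorem pairwise_take_sorted {α κ : Type} [LinearOrder κ] (p : List α) (key : α → κ) (n : Nat) :
    List.Pairwise (fun a b => key a ≤ key b) ((PySem.List.sorted p key).take n) :=
  (PySem.List.sorted_pairwise p key).sublist (List.take_sublist n _)

-- the loop invariant: after the whole loop over l, A's state is the stable sort of the
-- scored list cut to the first top entries
theorem top_similar_loop (str : String) (top : Int) (htop : 1 ≤ top) (l : List String) :
    top_similar l str top =
      (PySem.List.sorted (l.map (fun w => (w, levenstein w str))) (fun x => x.2)).take top.toNat := by
  induction l using List.reverseRecOn with
  | nil =>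
    have h2 : PySem.List.sorted ((([] : List String)).map (fun w => (w, levenstein w str)))
        (fun x : String × Int => x.2) = [] := (PySem.List.sorted_eq_nil_iff _ _ _).mpr rfl
    show ([] : List (String × Int)) = _
    rw [h2, List.take_nil]
  | append_singleton l w ih =>
    set key : String × Int → Int := fun x => x.2 with hkey
    set g : String → String × Int := fun w => (w, levenstein w str) with hg
    set t : Nat := top.toNat with ht
    have ht1 : 1 ≤ t := by omega
    set s : List (String × Int) := PySem.List.sorted (l.map g) key with hs
    have hslen : s.length = l.length := by
      rw [hs]; rw [PySem.List.length_sorted]; simp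
    have hstep : top_similar (l ++ [w]) str top =
        (fun most_similar (iw : Int × String) =>
          let distance := levenstein iw.2 str
          let ms :=
            if iw.1 < top then most_similar ++ [(iw.2, distance)]
            else
              match PySem.List.pyGet? most_similar (-1) with
              | none => []
              | some last =>
                if last.2 > distance then most_similar.dropLast ++ [(iw.2, distance)]
                else most_similar
          PySem.List.sorted ms (fun x => x.2)) (top_similar l str top) ((l.length : Int), w) := by
      show (PySem.List.enumerate (l ++ [w])).foldl _ [] = _
      rw [PySem.List.enumerate_append, List.foldl_append]
      simp [PySem.List.enumerate_cons, PySem.List.enumerate_nil]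
      rfl
    rw [hstep, ih]
    simp only []
    set x : String × Int := g w with hx
    set bf : String × Int → String × Int → Bool := fun a b => decide (key a < key b) with hbf
    have hins : PySem.List.sorted ((l.map g) ++ [x]) key = PySem.List.insertBy bf x s := by
      rw [hs, hbf, sorted_append_singleton]
    have hmapapp : (l ++ [w]).map g = (l.map g) ++ [x] := by simp [hx]
    rw [hmapapp, hins]
    by_cases hlt : (l.length : Int) < top
    · -- append branch: the kept list is still the whole sorted prefix
      have hlen : l.length < t := by omega
      have htake : s.take t = s := List.take_of_length_le (by omega)
      rw [if_pos hlt, htake]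
      have : PySem.List.sorted (s ++ [x]) key = PySem.List.insertBy bf x s := by
        rw [sorted_append_singleton, PySem.List.sorted_sorted]
      show PySem.List.sorted (s ++ [(w, levenstein w str)]) key = (PySem.List.insertBy bf x s).take t
      rw [show ((w, levenstein w str) : String × Int) = x from rfl, this,
        List.take_of_length_le (by rw [length_insertBy]; omega)]
    · -- replace/keep branch: the kept list has exactly t elements; its last is s[t-1]
      have hge : t ≤ l.length := by omega
      have hlen : (s.take t).length = t := by simp; omega
      have htlt : t - 1 < s.length := by omega
      have hlast : PySem.List.pyGet? (s.take t) (-1) = some (s[t - 1]) := by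
        simp only [PySem.List.pyGet?, PySem.List.pyIdx?, hlen]
        rw [if_neg (by omega), if_pos (by omega : -(t : Int) ≤ -1)]
        have h1 : t - ((-(-1 : Int)).toNat) = t - 1 := by norm_num
        rw [h1]
        show (List.take t s)[t - 1]? = some (s[t - 1]'htlt)
        rw [List.getElem?_take_of_lt (by omega), List.getElem?_eq_getElem htlt]
      rw [if_neg hlt, hlast]
      simp only []
      by_cases hrep : (s[t - 1]).2 > levenstein w str
      · -- strictly better than the current worst: it displaces it
        rw [if_pos hrep]
        have hdl : (s.take t).dropLast = s.take (t - 1) := by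
          rw [List.dropLast_eq_take, List.take_take]
          congr 1; omega
        have hsorted_dl : PySem.List.sorted (s.take (t - 1) ++ [x]) key =
            PySem.List.insertBy bf x (s.take (t - 1)) := by
          rw [sorted_append_singleton, PySem.List.sorted_eq_self_of_pairwise _ _ (pairwise_take_sorted _ _ _)]
        have hb : bf x (s[t - 1]) = true := by
          simp [hbf, hkey, hx, hg]; omega
        rw [hdl]
        show PySem.List.sorted (s.take (t - 1) ++ [(w, levenstein w str)]) key = _
        rw [show ((w, levenstein w str) : String × Int) = x from rfl, hsorted_dl,
          ← take_insertBy_of_before bf x s (t - 1) htlt hb]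
        congr 1; omega
      · -- not better: state unchanged, and the new element sorts past position t
        rw [if_neg hrep]
        rw [PySem.List.sorted_eq_self_of_pairwise _ _ (pairwise_take_sorted _ _ _)]
        rw [take_insertBy_of_not_before bf x s t (by omega)]
        intro i hi
        have hile : i < s.length := by omega
        have hkle : key (s[i]'hile) ≤ key (s[t - 1]'htlt) := by
          rcases Nat.lt_or_ge i (t - 1) with h | h
          · exact (List.pairwise_iff_getElem.mp (PySem.List.sorted_pairwise (l.map g) key)) i (t - 1)
              (by omega) (by omega) h
          · have : i = t - 1 := by omega
            subst this; exact le_refl _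
        have hge2 : key (s[t - 1]'htlt) ≤ key x := by
          show (s[t - 1]'htlt).2 ≤ levenstein w str
          omega
        show decide (key x < key (s[i]'hile)) = false
        simp only [decide_eq_false_iff_not]
        exact not_lt.mpr (le_trans hkle hge2)

-- ===== VERDICT (by name: the statement is the Claim_ definition above) =====
theorem top_similar_spec : Claim_equal_top_similar := by
  intro dict str top _ hpre
  show top_similar dict str top = top_similar_alt dict str top
  rcases hpre with h | h
  · subst h
    have h1 : top_similar [] str top = [] := rfl
    have h2 : top_similar_alt [] str top = [] := by
      show PySem.List.slice (PySem.List.sorted ((([] : List String)).map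
        (fun word => (word, levenstein_alt word str))) (fun x => x.2)) none (some (max top 0)) = []
      rw [List.map_nil, (PySem.List.sorted_eq_nil_iff _ _ _).mpr rfl,
        PySem.List.slice_to _ (le_max_right _ _), List.take_nil]
    rw [h1, h2]
  · rw [top_similar_loop str top h dict]
    show _ = PySem.List.slice _ none (some (max top 0))
    rw [max_eq_left (by omega), PySem.List.slice_to _ (by omega)]
    simp only [levenstein_eq]

theorem top_similar_raises : Claim_raises_top_similar := by
  unfold Claim_raises_top_similar
  constructor
  · rintro dict str top _ ⟨hne, hle⟩ (h | h)
    · exact hne h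
    · omega
  · exact ⟨by decide, by decide, by decide⟩

-- self-check: the raises-claim really pins B's value at the raise witness
theorem pvRaiseWitness_top_similar_ok :
    top_similar_alt (pvRaiseWitness_top_similar.1) (pvRaiseWitness_top_similar.2.1)
      (pvRaiseWitness_top_similar.2.2) = pvRaiseWitnessOut_top_similar :=
  top_similar_raises.2.2.2
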